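-- pv_equiv track=rewrite | github.com/PioterM27/test_projects | Projects/Zadania/Zadanie 9/Character_Code_Math.py | calc
-- ===== SOURCE A (Python) =====
-- def calc(s):
--     str_nbr = ''
--     str_nbr7to1 = ''
--     num1 = 0
--     num2 = 0
--     for index in s:
--         str_nbr += str(ord(index))
--         for char in str(ord(index)):
--             if (char == '7'):
--                 num1 += 7
--                 num2 += 1
--             else:
--                 num1 += int(char)
--                 num2 += int(char)
--
--     return num1 - num2
-- ===== SOURCE B (Python) =====
-- def calc(s):
--     digits = ''.join(str(ord(c)) for c in s)
--     sevens = 0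
--     for d in digits:
--         if d == '7':
--             sevens += 1
--     return 6 * sevens
-- ===== Notes on version B (the rewrite author's own statement) =====
-- stated objective: simpler
-- what changed: Replaces the two-accumulator subtract structure (num1/num2 updated per digit, result num1-num2) by the observation that non-'7' digits cancel between the two sums, so the result is 6 times the number of '7' digits: B builds the concatenated ord-code string once and counts the sevens in a single pass.
import Mathlib
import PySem

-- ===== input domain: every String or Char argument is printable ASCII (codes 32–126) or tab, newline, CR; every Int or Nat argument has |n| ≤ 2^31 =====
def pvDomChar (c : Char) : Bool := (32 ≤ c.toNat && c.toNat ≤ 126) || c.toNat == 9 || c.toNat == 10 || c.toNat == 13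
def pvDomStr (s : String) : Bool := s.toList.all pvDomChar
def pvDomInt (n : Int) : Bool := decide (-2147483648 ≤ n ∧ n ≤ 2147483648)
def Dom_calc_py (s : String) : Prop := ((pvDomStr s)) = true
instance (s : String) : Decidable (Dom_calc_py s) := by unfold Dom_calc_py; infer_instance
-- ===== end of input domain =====

-- B counts the '7' digits of the concatenated ord codes once and returns 6 * that count
-- (non-'7' digits cancel between A's two accumulators): simpler, same cost.

-- ===== PORT A =====
-- state = (str_nbr, num1, num2); the unused variable str_nbr7to1 of A is omitted (never read).
-- inner loop body of A; int(char) is ported as (PySem.Int.ofStr? [char]).getD 0 — exact here,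
-- since every char iterated over comes from str(ord(index)), a decimal numeral.
def calcInner (st : String × Int × Int) (ch : Char) : String × Int × Int :=
  if ch == '7' then (st.1, st.2.1 + 7, st.2.2 + 1)
  else (st.1, st.2.1 + ((PySem.Int.ofStr? (String.ofList [ch])).getD 0),
              st.2.2 + ((PySem.Int.ofStr? (String.ofList [ch])).getD 0))

-- outer loop body of A: append str(ord(index)) to str_nbr, then run the inner digit loop
def calcOuter (st : String × Int × Int) (index : Char) : String × Int × Int :=
  let code := PySem.Int.toStr ((index.toNat : Int))
  code.toList.foldl calcInner (st.1 ++ code, st.2.1, st.2.2)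

def calc_py (s : String) : Int :=
  let st := s.toList.foldl calcOuter ("", 0, 0)
  st.2.1 - st.2.2

-- ===== PORT B =====
def calc_py_alt (s : String) : Int :=
  let digits := PySem.Str.join "" (s.toList.map (fun c => PySem.Int.toStr ((c.toNat : Int))))
  let sevens := digits.toList.foldl (fun acc d => if d == '7' then acc + 1 else acc) (0 : Int)
  6 * sevens

-- ===== PRECONDITION & SPEC =====
def Spec_calc_py (s : String) (out : Int) : Prop := out = calc_py_alt s
instance (s : String) (out : Int) : Decidable (Spec_calc_py s out) := by unfold Spec_calc_py; infer_instance

-- ===== CLAIM (what is proved, stated in full; the proofs are below) =====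
def Claim_equal_calc_py : Prop := ∀ (s : String), Dom_calc_py s → Spec_calc_py s (calc_py s)

-- ===== LEMMAS AND PROOFS =====

-- A's inner digit loop changes num1 - num2 by exactly 6 per '7' (else both get int(char))
theorem calcInner_diff (l : List Char) (st : String × Int × Int) :
    (l.foldl calcInner st).2.1 - (l.foldl calcInner st).2.2
      = st.2.1 - st.2.2 + 6 * (l.count '7' : Int) := by
  induction l generalizing st with
  | nil => simp
  | cons c t ih =>
    simp only [List.foldl_cons, ih, calcInner, List.count_cons]
    by_cases h : c = '7' <;> simp [h] <;> ring

-- A's outer loop: num1 - num2 accumulates 6 per '7' digit across all ord codes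
theorem calcOuter_diff (l : List Char) (st : String × Int × Int) :
    (l.foldl calcOuter st).2.1 - (l.foldl calcOuter st).2.2
      = st.2.1 - st.2.2
        + 6 * ((l.flatMap (fun c => PySem.Int.toChars ((c.toNat : Int)))).count '7' : Int) := by
  induction l generalizing st with
  | nil => simp
  | cons c t ih =>
    simp only [List.foldl_cons, calcOuter, ih, calcInner_diff, PySem.Int.toList_toStr,
      List.flatMap_cons, List.count_append]
    push_cast; ring

theorem join_nil_eq_flatten (xs : List (List Char)) :
    PySem.Chars.join [] xs = xs.flatten := by
  induction xs with
  | nil => simp [PySem.Chars.join_nil]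
  | cons p rest ih =>
    cases rest with
    | nil => simp [PySem.Chars.join_singleton]
    | cons q r => simp [PySem.Chars.join_cons_cons, ih]

-- ===== VERDICT (by name: the statement is the Claim_ definition above) =====
theorem calc_py_spec : Claim_equal_calc_py := by
  intro s _
  show calc_py s = calc_py_alt s
  simp only [calc_py, calc_py_alt, calcOuter_diff, PySem.List.foldl_beq_add_one,
    PySem.Str.toList_join, String.toList_empty, join_nil_eq_flatten, List.map_map,
    List.flatten_eq_flatMap, List.flatMap_map, Function.comp, PySem.Int.toList_toStr, id]
  ring
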